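-- pv_equiv track=rewrite | github.com/pypi-data/pypi-mirror-383 | packages/xPDFsim/xpdfsim-0.0.2.tar.gz/xpdfsim-0.0.2/xPDFsim/xPDFsim.py | find_equivalent_pairs
-- ===== SOURCE A (Python) =====
-- def find_equivalent_pairs(bond_list):
--     """
--     Finds equivalent pairs in a list of atom-atom corellation pairs (e.g. Cu–N and N-Cu).
--     """
--     # Dictionary to store the an atom pair as the key
--     # and a list of its indices as the value.
--     # Example: {'(N, Cu)': [2, 8]}
--     pair_map = {}
--
--     # Iterate through the input list to get both the index and the value
--     for index, bond_str in enumerate(bond_list):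
--         # Split the string by the hyphen to get the two elements
--         elements = bond_str.split('-')
--
--         # Sort the elements alphabetically to create a canonical form.
--         elements.sort()
--
--         # Convert the sorted list to a tuple so it can be used as a dictionary key.
--         canonical_pair = tuple(elements)
--
--         if canonical_pair in pair_map:
--             pair_map[canonical_pair].append(index)
--         else:
--             pair_map[canonical_pair] = [index]
--
--     # Filter the results to include only the groups that have duplicates.
--     result = [indices for indices in pair_map.values() if len(indices) > 1]
--
--     return result
-- ===== SOURCE B (Python) =====
-- def find_equivalent_pairs(bond_list):
--     # Canonical key per position, then one grouping scan per distinct key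
--     # (first-appearance order), keeping groups of size > 1.
--     canon = [tuple(sorted(s.split('-'))) for s in bond_list]
--     result = []
--     for key in dict.fromkeys(canon):
--         group = [i for i, c in enumerate(canon) if c == key]
--         if len(group) > 1:
--             result.append(group)
--     return result
-- ===== Notes on version B (the rewrite author's own statement) =====
-- stated objective: alternative
-- what changed: Replaces A's single-pass dict-of-lists accumulation (append-or-create per index, then filter the dict's values) by a two-phase scheme: compute the canonical key per position once, deduplicate the key list in first-appearance order, and build each group by one filtering scan over the enumerated key list.
import Mathlib
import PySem

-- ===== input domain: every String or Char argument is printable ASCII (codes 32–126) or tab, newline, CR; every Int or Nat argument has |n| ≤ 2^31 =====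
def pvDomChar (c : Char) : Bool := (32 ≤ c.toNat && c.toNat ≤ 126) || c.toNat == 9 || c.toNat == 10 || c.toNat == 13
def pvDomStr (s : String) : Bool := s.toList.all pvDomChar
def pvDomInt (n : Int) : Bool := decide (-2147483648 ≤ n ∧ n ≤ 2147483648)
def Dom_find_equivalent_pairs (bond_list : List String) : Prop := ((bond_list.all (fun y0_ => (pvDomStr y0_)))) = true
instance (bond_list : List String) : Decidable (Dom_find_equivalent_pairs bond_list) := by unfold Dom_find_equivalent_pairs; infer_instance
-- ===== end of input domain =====

-- B groups by precomputed canonical keys (ordered dedup + one filtering scan per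
-- distinct key) instead of A's dict-of-lists accumulation; same result, alternative structure.


-- ===== PORT A =====
def find_equivalent_pairs (bond_list : List String) : List (List Int) :=
  let pair_map : PySem.Dict (List String) (List Int) :=
    (PySem.List.enumerate bond_list).foldl (fun pair_map p =>
      -- elements = bond_str.split('-'); elements.sort(); canonical_pair = tuple(elements)
      let elements := (PySem.Str.split? p.2 "-").getD []
      let canonical_pair := PySem.List.sorted elements (fun x => x) false
      if pair_map.contains canonical_pair then
        pair_map.insert canonical_pair (pair_map.getD canonical_pair [] ++ [p.1])
      else
        pair_map.insert canonical_pair [p.1]) PySem.Dict.empty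
  pair_map.values.filter (fun indices => indices.length > 1)

-- ===== PORT B =====
-- canon = [tuple(sorted(s.split('-'))) for s in bond_list]
def pvCanonKeys (bond_list : List String) : List (List String) :=
  bond_list.map (fun s => PySem.List.sorted ((PySem.Str.split? s "-").getD []) (fun x => x) false)

def find_equivalent_pairs_alt (bond_list : List String) : List (List Int) :=
  let canon := pvCanonKeys bond_list
  (PySem.List.dedup canon).foldl (fun result key =>
    let group := ((PySem.List.enumerate canon).filter (fun p => p.2 == key)).map (fun p => p.1)
    if group.length > 1 then result ++ [group] else result) []

-- ===== PRECONDITION & SPEC =====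
def Spec_find_equivalent_pairs (bond_list : List String) (out : List (List Int)) : Prop := out = find_equivalent_pairs_alt bond_list
instance (bond_list : List String) (out : List (List Int)) : Decidable (Spec_find_equivalent_pairs bond_list out) := by unfold Spec_find_equivalent_pairs; infer_instance

-- ===== CLAIM (what is proved, stated in full; the proofs are below) =====
def Claim_equal_find_equivalent_pairs : Prop := ∀ (bond_list : List String), Dom_find_equivalent_pairs bond_list → Spec_find_equivalent_pairs bond_list (find_equivalent_pairs bond_list)

-- ===== LEMMAS AND PROOFS =====

theorem pvFoldlAppendIf {α β : Type} (f : α → β) (p : α → Prop) [DecidablePred p]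
    (l : List α) (acc : List β) :
    l.foldl (fun acc x => if p x then acc ++ [f x] else acc) acc
      = acc ++ (l.filter (fun x => decide (p x))).map f := by
  induction l generalizing acc with
  | nil => simp
  | cons x t ih =>
    by_cases h : p x <;> simp [List.foldl_cons, h, ih]

-- one canonical key
def pvKey (s : String) : List String :=
  PySem.List.sorted ((PySem.Str.split? s "-").getD []) (fun x => x) false

-- A's loop body is exactly a Dict.modify at the canonical key.
theorem pvStepA_eq_modify (d : PySem.Dict (List String) (List Int)) (p : Int × String) :
    (if d.contains (pvKey p.2) then
        d.insert (pvKey p.2) (d.getD (pvKey p.2) [] ++ [p.1])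
      else d.insert (pvKey p.2) [p.1])
    = d.modify (pvKey p.2) [] (fun v => v ++ [p.1]) := by
  by_cases h : d.contains (pvKey p.2)
  · simp [h, PySem.Dict.modify, PySem.Dict.getD_eq_get?_getD]
  · have h0 : d.getD (pvKey p.2) [] = [] :=
      PySem.Dict.getD_of_not_contains d [] (by simpa using h)
    simp [h, PySem.Dict.modify, PySem.Dict.getD_eq_get?_getD] at h0 ⊢
    simp [h0]

theorem pvEnumerate_map {α β : Type} (f : α → β) (xs : List α) (s : Int) :
    PySem.List.enumerate (xs.map f) s = (PySem.List.enumerate xs s).map (fun p => (p.1, f p.2)) := by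
  induction xs generalizing s with
  | nil => simp [PySem.List.enumerate_nil]
  | cons x t ih => simp [PySem.List.enumerate_cons, ih]

theorem find_equivalent_pairs_eq (bond_list : List String) :
    find_equivalent_pairs bond_list = find_equivalent_pairs_alt bond_list := by
  -- Rewrite A's fold into the canonical modify-fold over (key, index) pairs.
  have hA : find_equivalent_pairs bond_list =
      (((PySem.List.enumerate bond_list).map (fun p => (pvKey p.2, p.1))).foldl
        (fun d q => d.modify q.1 [] (fun v => v ++ [q.2])) PySem.Dict.empty).values.filter
        (fun indices => indices.length > 1) := by
    unfold find_equivalent_pairs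
    rw [List.foldl_map]
    show List.filter (fun indices => decide (indices.length > 1))
        ((List.foldl (fun (pair_map : PySem.Dict (List String) (List Int)) (p : Int × String) =>
            if pair_map.contains (pvKey p.2) then
              pair_map.insert (pvKey p.2) (pair_map.getD (pvKey p.2) [] ++ [p.1])
            else pair_map.insert (pvKey p.2) [p.1]) PySem.Dict.empty
          (PySem.List.enumerate bond_list)).values) = _
    congr 2
    exact List.foldl_ext _ _ _ (fun d p _ => pvStepA_eq_modify d p)
  set l := (PySem.List.enumerate bond_list).map (fun p => (pvKey p.2, p.1)) with hl
  set D := l.foldl (fun d q => d.modify q.1 [] (fun v => v ++ [q.2])) PySem.Dict.empty with hD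
  set canon := pvCanonKeys bond_list with hcanon
  -- keys of the resulting dict: ordered dedup of the canonical key list
  have hmapfst : l.map (fun q => q.1) = canon := by
    rw [hl, List.map_map]
    show List.map (pvKey ∘ (fun p => p.2)) (PySem.List.enumerate bond_list) = _
    rw [← List.map_map, PySem.List.map_snd_enumerate]
    rfl
  have hkeys : D.keys = PySem.Set.ofList canon := by
    rw [hD]
    rw [PySem.Dict.keys_foldl_modify_key l (fun q => q.1) ([] : List Int)
      (fun _ q => fun v => v ++ [q.2]) PySem.Dict.empty]
    rw [hmapfst]
    simp [PySem.Dict.keys_empty, PySem.Set.update, PySem.Set.ofList_eq_foldl]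
  have hnodup : D.keys.Nodup := by
    rw [hD]
    exact PySem.Dict.nodup_keys_foldl_modify_key l (fun q => q.1) ([] : List Int)
      (fun _ q => fun v => v ++ [q.2]) PySem.Dict.empty (by simp [PySem.Dict.keys_empty])
  -- each stored list is the filtered index list of its key
  have henum : PySem.List.enumerate canon 0 =
      (PySem.List.enumerate bond_list 0).map (fun p => (p.1, pvKey p.2)) :=
    pvEnumerate_map pvKey bond_list 0
  have hgetD : ∀ k, D.getD k [] =
      ((PySem.List.enumerate canon).filter (fun p => p.2 == k)).map (fun p => p.1) := by
    intro k
    rw [hD, PySem.Dict.getD_foldl_modify_append l PySem.Dict.empty k, hl]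
    rw [show PySem.List.enumerate canon = PySem.List.enumerate canon 0 from rfl, henum]
    simp [List.filter_map, Function.comp_def]
  rw [hA]
  rw [PySem.Dict.values_eq_map_keys D hnodup []]
  rw [hkeys, funext hgetD]
  unfold find_equivalent_pairs_alt
  rw [← hcanon]
  show _ = (PySem.List.dedup canon).foldl (fun result key =>
      if (((PySem.List.enumerate canon).filter (fun p => p.2 == key)).map
            (fun p => p.1)).length > 1 then
        result ++ [((PySem.List.enumerate canon).filter (fun p => p.2 == key)).map (fun p => p.1)]
      else result) []
  rw [pvFoldlAppendIf]
  simp [List.filter_map, Function.comp_def, PySem.List.dedup_eq_ofList]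

-- ===== VERDICT (by name: the statement is the Claim_ definition above) =====
theorem find_equivalent_pairs_spec : Claim_equal_find_equivalent_pairs := by
  intro bond_list _
  unfold Spec_find_equivalent_pairs
  exact find_equivalent_pairs_eq bond_list
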